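-- pv_equiv track=rewrite | github.com/ch1nhpd/strix | strix/tools/assessment/assessment_orchestration_actions.py | _coalesced_completion_status
-- ===== SOURCE A (Python) =====
-- from typing import Any
--
-- def _coalesced_completion_status(events: list[dict[str, Any]]) -> str:
--     statuses = {str(item.get("completion_status") or "").strip().lower() for item in events}
--     if "error" in statuses or "failed" in statuses:
--         return "failed"
--     if "stopped" in statuses:
--         return "stopped"
--     if "finished" in statuses:
--         return "finished"
--     return "completed"
-- ===== SOURCE B (Python) =====
-- from typing import Any
--
-- _RANK_LABELS = ("failed", "stopped", "finished", "completed")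
--
-- def _status_rank(s: str) -> int:
--     if s == "error" or s == "failed":
--         return 0
--     if s == "stopped":
--         return 1
--     if s == "finished":
--         return 2
--     return 3
--
-- def _coalesced_completion_status(events: list[dict[str, Any]]) -> str:
--     rank = 3
--     for item in events:
--         r = _status_rank(str(item.get("completion_status") or "").strip().lower())
--         if r < rank:
--             rank = r
--     return _RANK_LABELS[rank]
-- ===== Notes on version B (the rewrite author's own statement) =====
-- stated objective: alternative
-- what changed: Replaces the set comprehension plus four ordered membership tests with a single fold that keeps a running minimum priority rank per event and maps the final rank back to its label.
import Mathlib
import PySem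

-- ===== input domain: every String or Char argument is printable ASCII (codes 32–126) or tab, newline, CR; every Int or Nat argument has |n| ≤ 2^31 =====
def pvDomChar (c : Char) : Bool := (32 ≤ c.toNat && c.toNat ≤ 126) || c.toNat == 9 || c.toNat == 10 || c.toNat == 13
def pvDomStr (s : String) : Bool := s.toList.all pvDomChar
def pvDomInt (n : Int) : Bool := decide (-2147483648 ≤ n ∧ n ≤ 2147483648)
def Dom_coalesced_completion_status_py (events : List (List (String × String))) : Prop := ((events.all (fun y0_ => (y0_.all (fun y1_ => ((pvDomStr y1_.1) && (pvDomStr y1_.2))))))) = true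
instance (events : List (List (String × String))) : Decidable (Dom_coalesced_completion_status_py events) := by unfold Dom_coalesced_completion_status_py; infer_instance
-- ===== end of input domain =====

-- B replaces the set comprehension plus ordered membership tests with a single
-- running-minimum fold over priority ranks (alternative decomposition, same cost).

-- shared normalization: str(item.get("completion_status") or "").strip().lower()
def pvNorm (item : List (String × String)) : String :=
  PySem.Str.lower (PySem.Str.strip ((PySem.Dict.mk item).get? "completion_status" |>.getD ""))

-- ===== PORT A =====
def coalesced_completion_status_py (events : List (List (String × String))) : String :=
  let statuses : PySem.Set String := PySem.Set.ofList (events.map pvNorm)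
  if PySem.Set.contains statuses "error" || PySem.Set.contains statuses "failed" then "failed"
  else if PySem.Set.contains statuses "stopped" then "stopped"
  else if PySem.Set.contains statuses "finished" then "finished"
  else "completed"

-- ===== PORT B =====
def pvRank (s : String) : Nat :=
  if s = "error" ∨ s = "failed" then 0
  else if s = "stopped" then 1
  else if s = "finished" then 2
  else 3

def coalesced_completion_status_py_alt (events : List (List (String × String))) : String :=
  let rank := events.foldl (fun m item => min m (pvRank (pvNorm item))) 3
  ["failed", "stopped", "finished", "completed"].getD rank "completed"

-- ===== PRECONDITION & SPEC =====
def Spec_coalesced_completion_status_py (events : List (List (String × String))) (out : String) : Prop := out = coalesced_completion_status_py_alt events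
instance (events : List (List (String × String))) (out : String) : Decidable (Spec_coalesced_completion_status_py events out) := by unfold Spec_coalesced_completion_status_py; infer_instance

-- ===== CLAIM (what is proved, stated in full; the proofs are below) =====
def Claim_equal_coalesced_completion_status_py : Prop := ∀ (events : List (List (String × String))), Dom_coalesced_completion_status_py events → Spec_coalesced_completion_status_py events (coalesced_completion_status_py events)

-- ===== LEMMAS AND PROOFS =====

-- the running-minimum fold computes the min of acc and the least rank present in l
theorem pv_fold_min (l : List String) (acc : Nat) (h : acc ≤ 3) :
    l.foldl (fun m s => min m (pvRank s)) acc =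
      min acc (if "error" ∈ l ∨ "failed" ∈ l then 0
               else if "stopped" ∈ l then 1
               else if "finished" ∈ l then 2 else 3) := by
  induction l generalizing acc with
  | nil => simp; omega
  | cons a l ih =>
    have hra : pvRank a ≤ 3 := by unfold pvRank; split_ifs <;> omega
    simp only [List.foldl_cons, List.mem_cons]
    rw [ih (min acc (pvRank a)) (by omega)]
    clear ih
    unfold pvRank
    split_ifs <;> simp_all [eq_comm]

theorem coalesced_eq (events : List (List (String × String))) :
    coalesced_completion_status_py events = coalesced_completion_status_py_alt events := by
  unfold coalesced_completion_status_py coalesced_completion_status_py_alt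
  have hfold : events.foldl (fun m item => min m (pvRank (pvNorm item))) 3 =
      (events.map pvNorm).foldl (fun m s => min m (pvRank s)) 3 := by
    rw [List.foldl_map]
  rw [hfold, pv_fold_min _ 3 (le_refl 3)]
  have hc : ∀ x : String, PySem.Set.contains (PySem.Set.ofList (events.map pvNorm)) x =
      decide (x ∈ events.map pvNorm) := by
    intro x
    simp [PySem.Set.contains, PySem.Set.mem_ofList]
  simp only [hc]
  by_cases h1 : ("error" : String) ∈ events.map pvNorm ∨ ("failed" : String) ∈ events.map pvNorm
  · rcases h1 with h | h <;> simp [h]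
  · rw [not_or] at h1
    obtain ⟨he, hf⟩ := h1
    by_cases h2 : ("stopped" : String) ∈ events.map pvNorm
    · simp [he, hf, h2]
    · by_cases h3 : ("finished" : String) ∈ events.map pvNorm
      · simp [he, hf, h2, h3]
      · simp [he, hf, h2, h3]

-- ===== VERDICT (by name: the statement is the Claim_ definition above) =====
theorem coalesced_completion_status_py_spec : Claim_equal_coalesced_completion_status_py := by
  intro events _
  exact coalesced_eq events
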